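-- pv_equiv track=rewrite | github.com/shweta112/UNICORN | data_utils.py | complete_file_list
-- ===== SOURCE A (Python) =====
-- def complete_file_list(files):
--     # Define the expected endings
--     endings = ['vK', 'Movat', 'HE', 'EvG']
--
--     # Create an empty list to store the complete file names
--     complete_files = []
--
--     # Loop through the expected endings
--     for ending in endings:
--         # Find the file with the current ending, or set to None if not found
--         file_with_ending = None
--         for file in files:
--             if ending in file:
--                 file_with_ending = file
--                 break
--
--         # Append the found file or None to the complete_files list
--         complete_files.append(file_with_ending)
--
--     return complete_files
-- ===== SOURCE B (Python) =====
-- def complete_file_list(files):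
--     endings = ['vK', 'Movat', 'HE', 'EvG']
--     # Single pass over files: assign each not-yet-filled ending its first match.
--     result = {}
--     for file in files:
--         for ending in endings:
--             if ending in file and ending not in result:
--                 result[ending] = file
--     return [result.get(e) for e in endings]
-- ===== Notes on version B (the rewrite author's own statement) =====
-- stated objective: alternative
-- what changed: B makes a single pass over the files building a dict of first matches per ending (filling a key only once), instead of A's outer loop over endings each rescanning the whole file list from the start.
import Mathlib
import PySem

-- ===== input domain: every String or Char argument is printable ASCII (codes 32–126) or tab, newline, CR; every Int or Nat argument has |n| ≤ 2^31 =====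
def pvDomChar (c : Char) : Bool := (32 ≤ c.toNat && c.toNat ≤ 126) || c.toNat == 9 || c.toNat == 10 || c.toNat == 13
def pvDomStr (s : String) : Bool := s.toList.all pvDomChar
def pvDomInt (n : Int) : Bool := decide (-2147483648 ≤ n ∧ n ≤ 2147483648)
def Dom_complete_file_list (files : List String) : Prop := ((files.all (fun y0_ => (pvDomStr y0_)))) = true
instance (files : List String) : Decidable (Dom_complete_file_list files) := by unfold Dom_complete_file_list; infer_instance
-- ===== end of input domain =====

-- B replaces A's per-ending rescan of the file list by one pass over the files
-- filling a first-match dict per ending (objective: alternative decomposition).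

-- ===== PORT A =====
-- inner 'for file in files: if ending in file: …; break' loop of A
def pvFindWithEnding (ending : String) : List String → Option String
  | [] => none
  | f :: rest => if PySem.Str.isIn ending f then some f else pvFindWithEnding ending rest

def complete_file_list (files : List String) : List (Option String) :=
  (["vK", "Movat", "HE", "EvG"]).foldl
    (fun complete_files ending => complete_files ++ [pvFindWithEnding ending files]) []

-- ===== PORT B =====
def pvEndingsB : List String := ["vK", "Movat", "HE", "EvG"]

def complete_file_list_alt (files : List String) : List (Option String) :=
  let result : PySem.Dict String String :=
    files.foldl
      (fun d file =>
        pvEndingsB.foldl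
          (fun d ending =>
            if PySem.Str.isIn ending file && !(d.contains ending) then d.insert ending file else d)
          d)
      PySem.Dict.empty
  pvEndingsB.map (fun e => result.get? e)

-- ===== PRECONDITION & SPEC =====
def Spec_complete_file_list (files : List String) (out : List (Option String)) : Prop := out = complete_file_list_alt files
instance (files : List String) (out : List (Option String)) : Decidable (Spec_complete_file_list files out) := by unfold Spec_complete_file_list; infer_instance

-- ===== CLAIM (what is proved, stated in full; the proofs are below) =====
def Claim_equal_complete_file_list : Prop := ∀ (files : List String), Dom_complete_file_list files → Spec_complete_file_list files (complete_file_list files)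

-- ===== LEMMAS AND PROOFS =====

-- effect of B's inner loop (over an arbitrary endings list) on one key's lookup
theorem pv_inner_get? (e file : String) :
    ∀ (es : List String) (d : PySem.Dict String String),
      (es.foldl
        (fun d ending =>
          if PySem.Str.isIn ending file && !(d.contains ending) then d.insert ending file else d)
        d).get? e =
      if e ∈ es ∧ d.contains e = false ∧ PySem.Str.isIn e file = true then some file
      else d.get? e := by
  intro es
  induction es with
  | nil => intro d; simp
  | cons e' es ih =>
    intro d
    simp only [List.foldl_cons]
    rw [ih]
    by_cases he : e' = e
    · subst he
      by_cases hin : PySem.Str.isIn e' file = true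
      · rw [PySem.Str.isIn_eq] at hin
        by_cases hc : d.contains e' = true
        · simp [hin, hc]
        · simp only [Bool.not_eq_true] at hc
          simp [hin, hc, PySem.Dict.contains_insert_self, PySem.Dict.get?_insert_self]
      · simp only [Bool.not_eq_true, PySem.Str.isIn_eq] at hin
        simp [hin]
    · have hne : ¬ e = e' := fun h => he h.symm
      have hcont : ∀ (d' : PySem.Dict String String),
          ((if PySem.Str.isIn e' file && !(d'.contains e') then d'.insert e' file else d').contains e)
            = d'.contains e := by
        intro d'
        split
        · simp [PySem.Dict.contains_insert, hne]
        · rfl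
      have hget : ∀ (d' : PySem.Dict String String),
          ((if PySem.Str.isIn e' file && !(d'.contains e') then d'.insert e' file else d').get? e)
            = d'.get? e := by
        intro d'
        split
        · rw [PySem.Dict.get?_insert]; simp [hne]
        · rfl
      rw [hcont, hget]
      simp [List.mem_cons, he, Ne.symm he]

-- effect of B's outer loop on one key: equals A's first-match scan
theorem pv_outer_get? (e : String) (he : e ∈ pvEndingsB) :
    ∀ (files : List String) (d : PySem.Dict String String),
      (files.foldl
        (fun d file =>
          pvEndingsB.foldl
            (fun d ending =>
              if PySem.Str.isIn ending file && !(d.contains ending) then d.insert ending file else d)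
            d)
        d).get? e =
      if d.contains e = true then d.get? e else pvFindWithEnding e files := by
  intro files
  induction files with
  | nil =>
    intro d
    by_cases hc : d.contains e = true
    · simp [hc]
    · simp only [Bool.not_eq_true] at hc
      simp [hc, pvFindWithEnding, (PySem.Dict.get?_eq_none_iff_contains d e).mpr hc]
  | cons f fs ih =>
    intro d
    simp only [List.foldl_cons]
    rw [ih]
    have hcontains :
        (pvEndingsB.foldl
          (fun d ending =>
            if PySem.Str.isIn ending f && !(d.contains ending) then d.insert ending f else d)
          d).contains e =
        (d.contains e || (decide (e ∈ pvEndingsB) && PySem.Str.isIn e f)) := by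
      rw [PySem.Dict.contains_eq_isSome_get?, pv_inner_get? e f]
      by_cases hc : d.contains e = true
      · simp [hc, ← PySem.Dict.contains_eq_isSome_get?]
      · simp only [Bool.not_eq_true] at hc
        by_cases hin : PySem.Str.isIn e f = true
        · rw [PySem.Str.isIn_eq] at hin
          simp [he, hc, hin]
        · simp only [Bool.not_eq_true, PySem.Str.isIn_eq] at hin
          simp [hc, hin, he, ← PySem.Dict.contains_eq_isSome_get?]
    rw [hcontains, pv_inner_get? e f]
    by_cases hc : d.contains e = true
    · simp [hc]
    · simp only [Bool.not_eq_true] at hc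
      by_cases hin : PySem.Str.isIn e f = true
      · rw [PySem.Str.isIn_eq] at hin
        simp [he, hc, hin, pvFindWithEnding]
      · simp only [Bool.not_eq_true, PySem.Str.isIn_eq] at hin
        simp [hc, hin, he, pvFindWithEnding, (PySem.Dict.get?_eq_none_iff_contains d e).mpr hc]

-- ===== VERDICT (by name: the statement is the Claim_ definition above) =====
theorem complete_file_list_spec : Claim_equal_complete_file_list := by
  intro files _
  unfold Spec_complete_file_list complete_file_list complete_file_list_alt
  simp only [List.foldl_cons, List.foldl_nil, List.nil_append, List.cons_append]
  have h := fun e he => pv_outer_get? e he files PySem.Dict.empty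
  simp only [PySem.Dict.contains_empty, Bool.false_eq_true, if_false] at h
  simp only [pvEndingsB, List.map_cons, List.map_nil]
  simp only [pvEndingsB] at h
  rw [h "vK" (by decide), h "Movat" (by decide), h "HE" (by decide), h "EvG" (by decide)]
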